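-- pv_equiv track=rewrite | github.com/frank-cywong/AdventOfCode | 2023/twelve-three.py | get_combo_from_s
-- ===== SOURCE A (Python) =====
-- def get_combo_from_s(s):
--     a = []
--     ccv = 0
--     for c in s:
--         if(c == "."):
--             if(ccv != 0):
--                 a.append(str(ccv))
--                 ccv = 0
--         else:
--             ccv += 1
--     if(ccv != 0):
--         a.append(str(ccv))
--     return ",".join(a)
-- ===== SOURCE B (Python) =====
-- def get_combo_from_s(s):
--     return ",".join(str(len(g)) for g in s.split(".") if g)
-- ===== Notes on version B (the rewrite author's own statement) =====
-- stated objective: idiomatic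
-- what changed: Replaced the explicit character-by-character counter state machine with a partition-then-measure one-liner: split on '.', drop empty pieces, map each group to str(len(group)), join with ',' (the splitting runs in C, removing the per-character interpreted loop).
import Mathlib
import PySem

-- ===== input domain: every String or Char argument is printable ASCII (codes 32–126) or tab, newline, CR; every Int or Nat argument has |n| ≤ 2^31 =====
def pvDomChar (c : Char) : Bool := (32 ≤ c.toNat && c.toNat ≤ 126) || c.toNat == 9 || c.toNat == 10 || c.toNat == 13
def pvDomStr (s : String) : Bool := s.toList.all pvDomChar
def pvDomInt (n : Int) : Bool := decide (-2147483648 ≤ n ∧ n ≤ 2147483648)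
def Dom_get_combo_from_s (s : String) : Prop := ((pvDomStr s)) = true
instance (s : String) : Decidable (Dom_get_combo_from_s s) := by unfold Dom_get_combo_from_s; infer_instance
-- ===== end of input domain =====

-- B: replaces A's character-by-character counter state machine with split-on-'.' /
-- filter empties / map str(len) / join — idiomatic decomposition (a timing run measured B faster by a constant factor).

-- ===== PORT A =====
-- loop body of A: on '.', flush the counter (if nonzero); otherwise increment it
def stepA (st : List String × Int) (c : Char) : List String × Int :=
  if c = '.' then
    (if st.2 ≠ 0 then (st.1 ++ [PySem.Int.toStr st.2], (0 : Int)) else st)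
  else (st.1, st.2 + 1)

-- A's trailing 'if ccv != 0: a.append(str(ccv))'
def finA (st : List String × Int) : List String :=
  if st.2 ≠ 0 then st.1 ++ [PySem.Int.toStr st.2] else st.1

def get_combo_from_s (s : String) : String :=
  PySem.Str.join "," (finA (s.toList.foldl stepA ([], 0)))

-- ===== PORT B =====
def get_combo_from_s_alt (s : String) : String :=
  PySem.Str.join ","
    ((((PySem.Str.split? s ".").getD []).filter (fun g => g ≠ "")).map
      (fun g => PySem.Int.toStr (PySem.Str.len g)))

-- ===== PRECONDITION & SPEC =====
def Spec_get_combo_from_s (s : String) (out : String) : Prop := out = get_combo_from_s_alt s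
instance (s : String) (out : String) : Decidable (Spec_get_combo_from_s s out) := by unfold Spec_get_combo_from_s; infer_instance

-- ===== CLAIM (what is proved, stated in full; the proofs are below) =====
def Claim_equal_get_combo_from_s : Prop := ∀ (s : String), Dom_get_combo_from_s s → Spec_get_combo_from_s s (get_combo_from_s s)

-- ===== LEMMAS AND PROOFS =====

/-- Lengths of the '.'-separated chunks of `l`, the current run already holding `n` chars. -/
def lensAux : List Char → Nat → List Nat
  | [], n => [n]
  | c :: t, n => if c = '.' then n :: lensAux t 0 else lensAux t (n + 1)

/-- The '.'-separated chunks of `l` (empties kept), `pre` the run in progress. -/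
def splitRuns : List Char → List Char → List (List Char)
  | pre, [] => [pre]
  | pre, c :: t => if c = '.' then pre :: splitRuns [] t else splitRuns (pre ++ [c]) t

theorem aLoop_eq (l : List Char) (a : List String) (n : Nat) :
    finA (l.foldl stepA (a, Int.ofNat n))
    = a ++ ((lensAux l n).filter (· ≠ 0)).map (fun k => PySem.Int.toStr (Int.ofNat k)) := by
  induction l generalizing a n with
  | nil =>
    by_cases hn : n = 0 <;>
      simp [finA, lensAux, hn]
  | cons c t ih =>
    by_cases hc : c = '.'
    · subst hc
      by_cases hn : n = 0
      · subst hn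
        simpa [List.foldl, stepA, lensAux] using ih a 0
      · have h1 : (Int.ofNat n) ≠ 0 := by simpa [Int.ofNat_eq_zero] using hn
        simpa [List.foldl, stepA, lensAux, h1, hn] using
          ih (a ++ [PySem.Int.toStr (Int.ofNat n)]) 0
    · have hcast : (Int.ofNat n) + 1 = Int.ofNat (n + 1) := by simp
      simpa [List.foldl, stepA, lensAux, hc, hcast] using ih a (n + 1)

theorem go_eq (l : List Char) (fuel : Nat) (cur : List Char) (acc : List (List Char))
    (h : l.length ≤ fuel) :
    PySem.Chars.splitOn.go ['.'] fuel l cur acc = acc.reverse ++ splitRuns cur.reverse l := by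
  induction l generalizing fuel cur acc with
  | nil =>
    cases fuel <;> simp [PySem.Chars.splitOn.go, splitRuns]
  | cons c t ih =>
    cases fuel with
    | zero => simp at h
    | succ fuel =>
      simp only [List.length_cons, Nat.succ_le_succ_iff] at h
      by_cases hc : c = '.'
      · subst hc
        rw [PySem.Chars.splitOn.go]
        simpa [splitRuns] using ih fuel [] (cur.reverse :: acc) h
      · have hc' : ¬ ('.' = c) := fun hh => hc hh.symm
        rw [PySem.Chars.splitOn.go]
        simpa [List.isPrefixOf, hc', splitRuns, hc] using ih fuel (c :: cur) acc h

theorem splitOn_eq (cs : List Char) :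
    PySem.Chars.splitOn cs ['.'] = splitRuns [] cs := by
  unfold PySem.Chars.splitOn
  simpa using go_eq cs (cs.length + 1) [] [] (by omega)

theorem runs_lens (l : List Char) (pre : List Char) :
    (((splitRuns pre l).filter (· ≠ [])).map (fun g => PySem.Int.toStr (Int.ofNat g.length)))
    = ((lensAux l pre.length).filter (· ≠ 0)).map (fun k => PySem.Int.toStr (Int.ofNat k)) := by
  induction l generalizing pre with
  | nil =>
    by_cases hp : pre = [] <;> simp [splitRuns, lensAux, hp, List.length_eq_zero_iff]
  | cons c t ih =>
    by_cases hc : c = '.'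
    · subst hc
      simp only [splitRuns, lensAux]
      by_cases hp : pre = []
      · simpa [hp] using ih []
      · have hl : pre.length ≠ 0 := by simpa [List.length_eq_zero_iff] using hp
        simpa [List.filter_cons, hp, hl] using ih []
    · simpa [splitRuns, lensAux, hc] using ih (pre ++ [c])

-- ===== VERDICT (by name: the statement is the Claim_ definition above) =====
theorem get_combo_from_s_spec : Claim_equal_get_combo_from_s := by
  intro s _
  unfold Spec_get_combo_from_s get_combo_from_s get_combo_from_s_alt
  rw [show (([], (0:Int)) : List String × Int) = (([] : List String), Int.ofNat 0) from rfl,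
    aLoop_eq s.toList [] 0]
  simp only [PySem.Str.split?, PySem.Chars.split?]
  rw [show ".".toList = ['.'] by decide, splitOn_eq]
  simp only [List.nil_append, Option.map_some, Option.getD_some,
    if_neg (by decide : ¬(['.'] : List Char).isEmpty = true)]
  have hmap : ((((splitRuns [] s.toList).map String.ofList).filter (fun g => g ≠ "")).map
      (fun g => PySem.Int.toStr (PySem.Str.len g)))
      = (((splitRuns [] s.toList).filter (· ≠ [])).map
        (fun g => PySem.Int.toStr (Int.ofNat g.length))) := by
    rw [List.filter_map, List.map_map]
    have hemp : ∀ g : List Char, (String.ofList g = "") ↔ (g = []) := by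
      intro g
      constructor
      · intro h
        have := congrArg String.toList h
        simpa using this
      · intro h
        subst h
        rfl
    have hf : ((fun g => PySem.Int.toStr (PySem.Str.len g)) ∘ String.ofList)
        = fun g : List Char => PySem.Int.toStr (Int.ofNat g.length) := by
      funext g
      simp [PySem.Str.len]
    have hp : ((fun g => decide (g ≠ "")) ∘ String.ofList)
        = fun g : List Char => decide (g ≠ []) := by
      funext g
      simp [Function.comp, hemp g]
    simp only [hf, hp]
  rw [hmap, runs_lens]
  rfl
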